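-- pv_equiv track=rewrite | github.com/DJun0003/algorithm_study | 프로그래머스/3/84021. 퍼즐 조각 채우기/퍼즐 조각 채우기.py | search
-- ===== SOURCE A (Python) =====
-- def near_box(board, cur, ch_num, box_list, min_idx, max_idx):
--     box_list.append(cur)
--     board[cur[0]][cur[1]] = 0 if ch_num==1 else 1
--     min_idx[0] = cur[0] if cur[0] < min_idx[0] else min_idx[0]
--     min_idx[1] = cur[1] if cur[1] < min_idx[1] else min_idx[1]
--     max_idx[0] = cur[0] if cur[0] > max_idx[0] else max_idx[0]
--     max_idx[1] = cur[1] if cur[1] > max_idx[1] else max_idx[1]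
--
--     for (y, x) in [[0, 1], [0, -1], [1, 0], [-1, 0]]:
--         ny, nx = cur[0] + y, cur[1] + x
--         if ny<len(board) and ny>-1 and nx<len(board) and nx>-1 and board[ny][nx] == ch_num:
--             box_list, min_idx, max_idx = near_box(board, [ny, nx], ch_num, box_list, min_idx, max_idx)
--
--
--     return box_list, min_idx, max_idx
--
-- def search(board, ch_num):
--     l = len(board)
--     all_boxes = []
--
--     for i in range(l):
--         for j in range(l):
--             if board[i][j] == ch_num:
--                 box_idx, min_idx, max_idx = near_box(board, [i,j], ch_num, [], [i,j], [i,j])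
--                 cur_box = [[0]*(max_idx[1]-min_idx[1]+1) for _ in range(max_idx[0]-min_idx[0]+1)]
--                 for [y,x] in box_idx:
--                     cur_box[y-min_idx[0]][x-min_idx[1]] = 1
--                 all_boxes.append(cur_box)
--     return all_boxes
-- ===== SOURCE B (Python) =====
-- def search(board, ch_num):
--     # Iterative flood fill with an explicit stack instead of A's recursive near_box.
--     # Mutates board in place exactly as A does.
--     l = len(board)
--     mark = 0 if ch_num == 1 else 1
--     all_boxes = []
--     for i in range(l):
--         for j in range(l):
--             if board[i][j] != ch_num:
--                 continue
--             stack = [(i, j)]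
--             cells = []
--             min_y, min_x, max_y, max_x = i, j, i, j
--             while stack:
--                 y, x = stack.pop()
--                 if board[y][x] != ch_num:
--                     continue
--                 board[y][x] = mark
--                 cells.append((y, x))
--                 if y < min_y: min_y = y
--                 if x < min_x: min_x = x
--                 if y > max_y: max_y = y
--                 if x > max_x: max_x = x
--                 for ny, nx in ((y - 1, x), (y + 1, x), (y, x - 1), (y, x + 1)):
--                     if 0 <= ny < l and 0 <= nx < l:
--                         stack.append((ny, nx))
--             cur_box = [[0] * (max_x - min_x + 1) for _ in range(max_y - min_y + 1)]
--             for y, x in cells: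
--                 cur_box[y - min_y][x - min_x] = 1
--             all_boxes.append(cur_box)
--     return all_boxes
-- ===== Notes on version B (the rewrite author's own statement) =====
-- stated objective: simpler
-- what changed: A's recursive near_box DFS (Python recursion per cell) is replaced by an iterative flood fill with an explicit stack inside a single while loop, pushing in-bounds neighbours and re-checking the cell value on pop; the outer row-major scan and the bounding-box grid construction are kept, so the same components are emitted in the same order.
import Mathlib
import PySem

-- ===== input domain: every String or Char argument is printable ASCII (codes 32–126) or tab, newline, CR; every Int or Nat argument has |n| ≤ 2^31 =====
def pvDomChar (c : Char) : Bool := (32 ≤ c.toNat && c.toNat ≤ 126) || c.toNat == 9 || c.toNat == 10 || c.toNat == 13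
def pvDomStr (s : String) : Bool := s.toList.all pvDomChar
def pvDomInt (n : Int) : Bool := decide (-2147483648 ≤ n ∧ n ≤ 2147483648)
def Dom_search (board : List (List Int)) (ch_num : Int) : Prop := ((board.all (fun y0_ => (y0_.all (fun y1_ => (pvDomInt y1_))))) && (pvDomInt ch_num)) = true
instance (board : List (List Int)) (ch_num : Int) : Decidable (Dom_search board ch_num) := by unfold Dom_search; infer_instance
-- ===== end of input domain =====

-- B replaces A's recursive near_box flood fill by an iterative explicit-stack flood fill (same cell
-- visit order, same in-place board mutation in Python); equivalence claimed for the RETURN value.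

-- ===== PORT A =====
-- shared index helpers: board[y][x] reads/writes; all call sites guard 0 ≤ y,x, so .toNat is exact,
-- and under Pre_search every access is in range (the `none`/out-of-range defaults are never taken).
def get2 (b : List (List Int)) (y x : Int) : Int :=
  match PySem.List.pyGet? b y with
  | some row =>
    match PySem.List.pyGet? row x with
    | some v => v
    | none => 0
  | none => 0

def set2 (b : List (List Int)) (y x : Int) (v : Int) : List (List Int) :=
  b.set y.toNat ((b.getD y.toNat []).set x.toNat v)

-- number of cells equal to ch: used only as recursion fuel (totality guard) for near_box's port;
-- each recursive call of near_box permanently overwrites one ch-cell, so this fuel is sufficient.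
def cnt (b : List (List Int)) (ch : Int) : Nat :=
  (b.map (fun r => r.countP (fun v => v == ch))).sum

mutual
-- literal port of near_box; the for-loop over the 4 directions [[0,1],[0,-1],[1,0],[-1,0]] is the
-- chain of nbGo steps; state = (board, box_list, min_idx, max_idx) (board threaded for the mutation)
def nb (fuel : Nat) (b : List (List Int)) (y x ch : Int) (box : List (Int × Int)) (mn mx : Int × Int) :
    List (List Int) × List (Int × Int) × (Int × Int) × (Int × Int) :=
  match fuel with
  | 0 => (b, box, mn, mx)
  | f + 1 =>
    let b1 := set2 b y x (if ch = 1 then 0 else 1)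
    let box1 := box ++ [(y, x)]
    let mn1 : Int × Int := (if y < mn.1 then y else mn.1, if x < mn.2 then x else mn.2)
    let mx1 : Int × Int := (if y > mx.1 then y else mx.1, if x > mx.2 then x else mx.2)
    let s1 := nbGo f ch (y + 0) (x + 1) (b1, box1, mn1, mx1)
    let s2 := nbGo f ch (y + 0) (x - 1) s1
    let s3 := nbGo f ch (y + 1) (x + 0) s2
    nbGo f ch (y - 1) (x + 0) s3
  termination_by (fuel, 0)

-- one direction step of near_box's for-loop: the guarded recursive call
def nbGo (f : Nat) (ch ny nx : Int)
    (s : List (List Int) × List (Int × Int) × (Int × Int) × (Int × Int)) :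
    List (List Int) × List (Int × Int) × (Int × Int) × (Int × Int) :=
  if ny < (s.1.length : Int) ∧ ny > -1 ∧ nx < (s.1.length : Int) ∧ nx > -1 ∧ get2 s.1 ny nx = ch
  then nb f s.1 ny nx ch s.2.1 s.2.2.1 s.2.2.2
  else s
  termination_by (f, 1)
end

-- cur_box construction (shared by both ports; identical code in Source A and Source B):
-- zero matrix, then set 1 at each recorded (shifted) cell
def buildBox (cells : List (Int × Int)) (mn mx : Int × Int) : List (List Int) :=
  let base := List.replicate (mx.1 - mn.1 + 1).toNat (List.replicate (mx.2 - mn.2 + 1).toNat (0 : Int))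
  cells.foldl (fun g p => set2 g (p.1 - mn.1) (p.2 - mn.2) 1) base

def search (board : List (List Int)) (ch_num : Int) : List (List (List Int)) :=
  let l : Int := (board.length : Int)
  let r :=
    (PySem.List.pyRange 0 l 1).foldl (fun st i =>
      (PySem.List.pyRange 0 l 1).foldl (fun (st : List (List Int) × List (List (List Int))) j =>
        if get2 st.1 i j = ch_num then
          let s := nb (cnt st.1 ch_num) st.1 i j ch_num [] (i, j) (i, j)
          (s.1, st.2 ++ [buildBox s.2.1 s.2.2.1 s.2.2.2])
        else st) st)
      (board, ([] : List (List (List Int))))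
  r.2

-- ===== PORT B =====
-- lemmas the port of B needs for termination (cited in decreasing_by)
theorem pv_cnt_set2_lt (b : List (List Int)) (y x : Int) (row : List Int) (v m ch : Int)
    (hy : b[y.toNat]? = some row) (hx : row[x.toNat]? = some v)
    (hv : v = ch) (hm : m ≠ ch) : cnt (set2 b y x m) ch + 1 = cnt b ch := by
  have hyl : y.toNat < b.length := (List.getElem?_eq_some_iff.mp hy).1
  have hgd : b.getD y.toNat [] = row := by
    rw [List.getD_eq_getElem?_getD, hy]; rfl
  unfold set2
  rw [hgd]
  have hset : ∀ (r : List Int) (n : Nat), r[n]? = some v →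
      ((r.set n m).countP (fun w => w == ch)) + 1 = r.countP (fun w => w == ch) := by
    intro r
    induction r with
    | nil => intro n h; simp at h
    | cons a r ih =>
      intro n h
      cases n with
      | zero =>
        simp at h
        subst h
        simp [hm, hv]
      | succ k =>
        simp at h
        have := ih k h
        simp only [List.set_cons_succ, List.countP_cons]
        omega
  have hrow : (row.set x.toNat m).countP (fun w => w == ch) + 1 = row.countP (fun w => w == ch) :=
    hset row x.toNat hx
  clear hx hgd hm hv
  induction b generalizing y with
  | nil => simp at hyl
  | cons r bs ih =>
    by_cases h0 : y.toNat = 0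
    · rw [h0] at hy ⊢
      simp at hy
      subst hy
      simp only [List.set_cons_zero, cnt, List.map_cons, List.sum_cons]
      omega
    · obtain ⟨k, hk⟩ : ∃ k, y.toNat = k + 1 := ⟨y.toNat - 1, by omega⟩
      rw [hk] at hy hyl ⊢
      simp only [List.set_cons_succ, cnt, List.map_cons, List.sum_cons]
      simp only [List.getElem?_cons_succ] at hy
      simp only [List.length_cons, Nat.add_lt_add_iff_right] at hyl
      have := ih (y := (k : Int)) (by simpa using hy) (by simpa using hyl)
      simp only [cnt, Int.toNat_natCast] at this
      omega

def loopB (ch : Int) (b : List (List Int)) (stack : List (Int × Int))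
    (box : List (Int × Int)) (mn mx : Int × Int) :
    List (List Int) × List (Int × Int) × (Int × Int) × (Int × Int) :=
  match stack with
  | [] => (b, box, mn, mx)
  | (y, x) :: rest =>
    -- popped coordinates are always in range under Pre_search; the nonneg test and the two Option
    -- matches are totality guards for the raw board[y][x] read of Source B
    if h0 : 0 ≤ y ∧ 0 ≤ x then
      match hy : b[y.toNat]? with
      | none => loopB ch b rest box mn mx
      | some row =>
        match hx : row[x.toNat]? with
        | none => loopB ch b rest box mn mx
        | some v =>
          if v = ch then
            let b1 := set2 b y x (if ch = 1 then 0 else 1)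
            let box1 := box ++ [(y, x)]
            let mn1 : Int × Int := (if y < mn.1 then y else mn.1, if x < mn.2 then x else mn.2)
            let mx1 : Int × Int := (if y > mx.1 then y else mx.1, if x > mx.2 then x else mx.2)
            let l : Int := (b1.length : Int)
            -- append of the in-bounds neighbours then pop-from-the-end = reversed filtered list on top
            let pushed := (([(y - 1, x), (y + 1, x), (y, x - 1), (y, x + 1)] : List (Int × Int)).filter
              (fun p => decide (0 ≤ p.1 ∧ p.1 < l ∧ 0 ≤ p.2 ∧ p.2 < l))).reverse
            loopB ch b1 (pushed ++ rest) box1 mn1 mx1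
          else loopB ch b rest box mn mx
    else loopB ch b rest box mn mx
  termination_by (5 * cnt b ch + stack.length)
  decreasing_by
  all_goals simp_wf
  have hmark : (if ch = 1 then (0 : Int) else 1) ≠ ch := by split <;> omega
  have hc := pv_cnt_set2_lt b y x row v (if ch = 1 then (0 : Int) else 1) ch hy hx (by assumption) hmark
  have hp := List.length_filter_le
    (fun p : Int × Int => decide (0 ≤ p.1) &&
      (decide (p.1 < ((set2 b y x (if ch = 1 then 0 else 1)).length : Int)) &&
        (decide (0 ≤ p.2) && decide (p.2 < ((set2 b y x (if ch = 1 then 0 else 1)).length : Int)))))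
    ([(y - 1, x), (y + 1, x), (y, x - 1), (y, x + 1)] : List (Int × Int))
  simp only [List.length_cons, List.length_nil] at hp
  omega

def search_alt (board : List (List Int)) (ch_num : Int) : List (List (List Int)) :=
  let l : Int := (board.length : Int)
  let r :=
    (PySem.List.pyRange 0 l 1).foldl (fun st i =>
      (PySem.List.pyRange 0 l 1).foldl (fun (st : List (List Int) × List (List (List Int))) j =>
        if get2 st.1 i j = ch_num then
          let s := loopB ch_num st.1 [(i, j)] [] (i, j) (i, j)
          (s.1, st.2 ++ [buildBox s.2.1 s.2.2.1 s.2.2.2])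
        else st) st)
      (board, ([] : List (List (List Int))))
  r.2

-- ===== PRECONDITION & SPEC =====
-- Pre_search excludes exactly the boards on which A raises IndexError: A indexes every row with
-- column indices up to len(board)-1, so every row must have at least len(board) entries.
def Pre_search (board : List (List Int)) (ch_num : Int) : Prop :=
  ∀ r ∈ board, board.length ≤ r.length
instance (board : List (List Int)) (ch_num : Int) : Decidable (Pre_search board ch_num) := by
  unfold Pre_search; infer_instance

def pvWitness_search : List (List Int) × Int := ([[1, 0], [0, 1]], 1)

def Spec_search (board : List (List Int)) (ch_num : Int) (out : List (List (List Int))) : Prop := out = search_alt board ch_num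
instance (board : List (List Int)) (ch_num : Int) (out : List (List (List Int))) : Decidable (Spec_search board ch_num out) := by unfold Spec_search; infer_instance

-- ===== CLAIM (what is proved, stated in full; the proofs are below) =====
def Claim_equal_search : Prop := ∀ (board : List (List Int)) (ch_num : Int), Dom_search board ch_num → Pre_search board ch_num → Spec_search board ch_num (search board ch_num)

-- ===== LEMMAS AND PROOFS =====

-- equation lemmas for loopB
theorem loopB_nil (ch : Int) (b : List (List Int)) (box : List (Int × Int)) (mn mx : Int × Int) :
    loopB ch b [] box mn mx = (b, box, mn, mx) := by
  rw [loopB]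

theorem loopB_skip (ch : Int) (b : List (List Int)) (y x : Int) (rest : List (Int × Int))
    (box : List (Int × Int)) (mn mx : Int × Int) (row : List Int) (v : Int)
    (h0y : 0 ≤ y) (h0x : 0 ≤ x) (hy : b[y.toNat]? = some row) (hx : row[x.toNat]? = some v)
    (hv : v ≠ ch) :
    loopB ch b ((y, x) :: rest) box mn mx = loopB ch b rest box mn mx := by
  rw [loopB, dif_pos (And.intro h0y h0x)]
  split
  · rfl
  · rename_i row' heq1
    split
    · rfl
    · rename_i v' heq2
      split
      · rename_i hvch
        exfalso
        rw [hy] at heq1; injection heq1 with e; subst e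
        rw [hx] at heq2; injection heq2 with e2; subst e2
        exact hv hvch
      · rfl

theorem loopB_mark (ch : Int) (b : List (List Int)) (y x : Int) (rest : List (Int × Int))
    (box : List (Int × Int)) (mn mx : Int × Int) (row : List Int) (v : Int)
    (h0y : 0 ≤ y) (h0x : 0 ≤ x) (hy : b[y.toNat]? = some row) (hx : row[x.toNat]? = some v)
    (hv : v = ch) :
    loopB ch b ((y, x) :: rest) box mn mx =
      loopB ch (set2 b y x (if ch = 1 then 0 else 1))
        ((([(y - 1, x), (y + 1, x), (y, x - 1), (y, x + 1)] : List (Int × Int)).filter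
            (fun p => decide (0 ≤ p.1 ∧ p.1 < ((set2 b y x (if ch = 1 then 0 else 1)).length : Int) ∧
              0 ≤ p.2 ∧ p.2 < ((set2 b y x (if ch = 1 then 0 else 1)).length : Int)))).reverse ++ rest)
        (box ++ [(y, x)])
        (if y < mn.1 then y else mn.1, if x < mn.2 then x else mn.2)
        (if y > mx.1 then y else mx.1, if x > mx.2 then x else mx.2) := by
  rw [loopB, dif_pos (And.intro h0y h0x)]
  split
  · exfalso; rename_i heq; rw [hy] at heq; cases heq
  · rename_i row' heq1
    split
    · exfalso
      rw [hy] at heq1; injection heq1 with e; subst e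
      rename_i heq2; rw [hx] at heq2; cases heq2
    · rename_i v' heq2
      split
      · rfl
      · rename_i hvch
        exfalso
        rw [hy] at heq1; injection heq1 with e; subst e
        rw [hx] at heq2; injection heq2 with e2; subst e2
        exact hvch hv

-- equation lemmas for nb / nbGo
theorem nb_zero (b : List (List Int)) (y x ch : Int) (box : List (Int × Int)) (mn mx : Int × Int) :
    nb 0 b y x ch box mn mx = (b, box, mn, mx) := by
  rw [nb]

theorem nb_succ (f : Nat) (b : List (List Int)) (y x ch : Int) (box : List (Int × Int)) (mn mx : Int × Int) :
    nb (f + 1) b y x ch box mn mx =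
      nbGo f ch (y - 1) (x + 0) (nbGo f ch (y + 1) (x + 0) (nbGo f ch (y + 0) (x - 1)
        (nbGo f ch (y + 0) (x + 1)
          (set2 b y x (if ch = 1 then 0 else 1), box ++ [(y, x)],
            (if y < mn.1 then y else mn.1, if x < mn.2 then x else mn.2),
            (if y > mx.1 then y else mx.1, if x > mx.2 then x else mx.2))))) := by
  rw [nb]

theorem nbGo_pos (f : Nat) (ch ny nx : Int)
    (s : List (List Int) × List (Int × Int) × (Int × Int) × (Int × Int))
    (h : ny < (s.1.length : Int) ∧ ny > -1 ∧ nx < (s.1.length : Int) ∧ nx > -1 ∧ get2 s.1 ny nx = ch) :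
    nbGo f ch ny nx s = nb f s.1 ny nx ch s.2.1 s.2.2.1 s.2.2.2 := by
  rw [nbGo]; rw [if_pos h]

theorem nbGo_neg (f : Nat) (ch ny nx : Int)
    (s : List (List Int) × List (Int × Int) × (Int × Int) × (Int × Int))
    (h : ¬ (ny < (s.1.length : Int) ∧ ny > -1 ∧ nx < (s.1.length : Int) ∧ nx > -1 ∧ get2 s.1 ny nx = ch)) :
    nbGo f ch ny nx s = s := by
  rw [nbGo]; simp only [if_neg h]

-- board invariants: fixed outer length L, every row at least L long
theorem set2_length (b : List (List Int)) (y x v : Int) : (set2 b y x v).length = b.length := by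
  simp [set2]

theorem set2_rows (b : List (List Int)) (y x v : Int) (L : Nat)
    (h : ∀ r ∈ b, L ≤ r.length) : ∀ r ∈ set2 b y x v, L ≤ r.length := by
  intro r hr
  unfold set2 at hr
  by_cases hyl : y.toNat < b.length
  · rcases List.mem_or_eq_of_mem_set hr with h1 | h1
    · exact h r h1
    · rw [h1, List.length_set]
      have hgd : b.getD y.toNat [] = b[y.toNat] := by
        rw [List.getD_eq_getElem?_getD, List.getElem?_eq_getElem hyl]; rfl
      rw [hgd]
      exact h _ (List.getElem_mem hyl)
  · rw [List.set_eq_of_length_le (by omega)] at hr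
    exact h r hr

theorem pv_countP_set_le (p : Int → Bool) (m : Int) (hm : p m = false) :
    ∀ (r : List Int) (n : Nat), ((r.set n m).countP p) ≤ r.countP p := by
  intro r
  induction r with
  | nil => intro n; simp
  | cons a r ih =>
    intro n
    cases n with
    | zero => simp [List.countP_cons, hm]
    | succ k => simp only [List.set_cons_succ, List.countP_cons]; have := ih k; omega

theorem cnt_set_le (ch : Int) : ∀ (b : List (List Int)) (n : Nat) (r' : List Int),
    r'.countP (fun w => w == ch) ≤ (b.getD n []).countP (fun w => w == ch) →
    cnt (b.set n r') ch ≤ cnt b ch := by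
  intro b
  induction b with
  | nil => intro n r' _; simp [cnt]
  | cons r bs ih =>
    intro n r' h
    cases n with
    | zero =>
      simp only [List.getD_cons_zero] at h
      simp only [List.set_cons_zero, cnt, List.map_cons, List.sum_cons]
      omega
    | succ k =>
      simp only [List.getD_cons_succ] at h
      simp only [List.set_cons_succ, cnt, List.map_cons, List.sum_cons]
      have := ih k r' h
      simp only [cnt] at this
      omega

theorem cnt_set2_le (b : List (List Int)) (y x m ch : Int) (hm : m ≠ ch) :
    cnt (set2 b y x m) ch ≤ cnt b ch := by
  unfold set2
  exact cnt_set_le ch b y.toNat _ (pv_countP_set_le (fun w => w == ch) m (by simp [hm]) _ x.toNat)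

theorem cnt_pos (b : List (List Int)) (y x : Int) (row : List Int) (v ch : Int)
    (hy : b[y.toNat]? = some row) (hx : row[x.toNat]? = some v) (hv : v = ch) :
    1 ≤ cnt b ch := by
  have := pv_cnt_set2_lt b y x row v (ch + 1) ch hy hx hv (by omega)
  omega

theorem mark_ne (ch : Int) : (if ch = 1 then (0 : Int) else 1) ≠ ch := by
  split <;> omega

-- preservation of the invariants by nb (proved together by induction on the fuel)
theorem nb_inv (ch : Int) (L : Nat) : ∀ (f : Nat) (b : List (List Int)) (y x : Int)
    (box : List (Int × Int)) (mn mx : Int × Int),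
    b.length = L → (∀ r ∈ b, L ≤ r.length) →
    (nb f b y x ch box mn mx).1.length = L ∧
      (∀ r ∈ (nb f b y x ch box mn mx).1, L ≤ r.length) ∧
      cnt (nb f b y x ch box mn mx).1 ch ≤ cnt b ch := by
  intro f
  induction f with
  | zero => intro b y x box mn mx h1 h2; rw [nb_zero]; exact ⟨h1, h2, le_refl _⟩
  | succ f ih =>
    intro b y x box mn mx h1 h2
    have hGo : ∀ ny nx (s : List (List Int) × List (Int × Int) × (Int × Int) × (Int × Int)),
        s.1.length = L → (∀ r ∈ s.1, L ≤ r.length) →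
        (nbGo f ch ny nx s).1.length = L ∧ (∀ r ∈ (nbGo f ch ny nx s).1, L ≤ r.length) ∧
          cnt (nbGo f ch ny nx s).1 ch ≤ cnt s.1 ch := by
      intro ny nx s hs1 hs2
      by_cases hc : ny < (s.1.length : Int) ∧ ny > -1 ∧ nx < (s.1.length : Int) ∧ nx > -1 ∧ get2 s.1 ny nx = ch
      · rw [nbGo_pos f ch ny nx s hc]
        exact ih s.1 ny nx s.2.1 s.2.2.1 s.2.2.2 hs1 hs2
      · rw [nbGo_neg f ch ny nx s hc]
        exact ⟨hs1, hs2, le_refl _⟩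
    rw [nb_succ]
    have h1' : (set2 b y x (if ch = 1 then 0 else 1)).length = L := by rw [set2_length]; exact h1
    have h2' := set2_rows b y x (if ch = 1 then 0 else 1) L h2
    have hcnt' := cnt_set2_le b y x _ ch (mark_ne ch)
    obtain ⟨a1, a2, a3⟩ := hGo (y + 0) (x + 1) (set2 b y x (if ch = 1 then 0 else 1), box ++ [(y, x)],
      (if y < mn.1 then y else mn.1, if x < mn.2 then x else mn.2),
      (if y > mx.1 then y else mx.1, if x > mx.2 then x else mx.2)) h1' h2'
    simp only at a3
    obtain ⟨b1, b2, b3⟩ := hGo (y + 0) (x - 1) _ a1 a2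
    obtain ⟨c1, c2, c3⟩ := hGo (y + 1) (x + 0) _ b1 b2
    obtain ⟨d1, d2, d3⟩ := hGo (y - 1) (x + 0) _ c1 c2
    exact ⟨d1, d2, by omega⟩

-- get2 on an in-range cell
theorem get2_eq (b : List (List Int)) (y x : Int) (row : List Int) (v : Int)
    (h0y : 0 ≤ y) (h0x : 0 ≤ x) (hy : b[y.toNat]? = some row) (hx : row[x.toNat]? = some v) :
    get2 b y x = v := by
  have e1 : PySem.List.pyGet? b y = some row := by
    rw [PySem.List.pyGet?_of_nonneg b h0y]; exact hy
  have e2 : PySem.List.pyGet? row x = some v := by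
    rw [PySem.List.pyGet?_of_nonneg row h0x]; exact hx
  unfold get2
  simp only [e1, e2]

theorem cell_exists (b : List (List Int)) (y x : Int) (L : Nat)
    (h1 : b.length = L) (h2 : ∀ r ∈ b, L ≤ r.length)
    (h0y : 0 ≤ y) (hyL : y < (L : Int)) (h0x : 0 ≤ x) (hxL : x < (L : Int)) :
    ∃ row v, b[y.toNat]? = some row ∧ row[x.toNat]? = some v ∧ get2 b y x = v := by
  have hyl : y.toNat < b.length := by omega
  have hy : b[y.toNat]? = some b[y.toNat] := List.getElem?_eq_getElem hyl
  have hxl : x.toNat < b[y.toNat].length := by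
    have := h2 _ (List.getElem_mem hyl)
    omega
  have hx : b[y.toNat][x.toNat]? = some b[y.toNat][x.toNat] := List.getElem?_eq_getElem hxl
  exact ⟨_, _, hy, hx, get2_eq b y x _ _ h0y h0x hy hx⟩

-- the chain of the four direction steps of near_box, as a fold (proof-side helper)
def goChain (f : Nat) (ch : Int) (q : List (Int × Int))
    (s : List (List Int) × List (Int × Int) × (Int × Int) × (Int × Int)) :
    List (List Int) × List (Int × Int) × (Int × Int) × (Int × Int) :=
  q.foldl (fun s n => nbGo f ch n.1 n.2 s) s

theorem goChain_nil (f : Nat) (ch : Int) (s : List (List Int) × List (Int × Int) × (Int × Int) × (Int × Int)) :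
    goChain f ch [] s = s := rfl

theorem goChain_cons (f : Nat) (ch : Int) (n : Int × Int) (q : List (Int × Int))
    (s : List (List Int) × List (Int × Int) × (Int × Int) × (Int × Int)) :
    goChain f ch (n :: q) s = goChain f ch q (nbGo f ch n.1 n.2 s) := rfl

-- processing a list of pending neighbour candidates: stack form = chained nbGo form
theorem pv_chain (ch : Int) (L f : Nat)
    (IH : ∀ (b : List (List Int)) (y x : Int) (stack box : List (Int × Int)) (mn mx : Int × Int),
      b.length = L → (∀ r ∈ b, L ≤ r.length) →
      0 ≤ y → y < (L : Int) → 0 ≤ x → x < (L : Int) → get2 b y x = ch → cnt b ch ≤ f →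
      loopB ch b ((y, x) :: stack) box mn mx =
        loopB ch (nb f b y x ch box mn mx).1 stack (nb f b y x ch box mn mx).2.1
          (nb f b y x ch box mn mx).2.2.1 (nb f b y x ch box mn mx).2.2.2) :
    ∀ (q : List (Int × Int)) (s : List (List Int) × List (Int × Int) × (Int × Int) × (Int × Int))
      (stack : List (Int × Int)),
      s.1.length = L → (∀ r ∈ s.1, L ≤ r.length) → cnt s.1 ch ≤ f →
      loopB ch s.1 ((q.filter (fun w => decide (0 ≤ w.1 ∧ w.1 < (L : Int) ∧ 0 ≤ w.2 ∧ w.2 < (L : Int)))) ++ stack)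
          s.2.1 s.2.2.1 s.2.2.2
        = loopB ch (goChain f ch q s).1 stack (goChain f ch q s).2.1 (goChain f ch q s).2.2.1
            (goChain f ch q s).2.2.2 := by
  intro q
  induction q with
  | nil => intro s stack _ _ _; rw [goChain_nil]; simp
  | cons n q' ihq =>
    intro s stack hs1 hs2 hcnt
    obtain ⟨ny, nx⟩ := n
    rw [goChain_cons]
    by_cases hb : 0 ≤ ny ∧ ny < (L : Int) ∧ 0 ≤ nx ∧ nx < (L : Int)
    · rw [List.filter_cons_of_pos (by simpa using hb)]
      obtain ⟨row, v, hy, hx, hg⟩ := cell_exists s.1 ny nx L hs1 hs2 hb.1 hb.2.1 hb.2.2.1 hb.2.2.2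
      by_cases hv : get2 s.1 ny nx = ch
      · rw [List.cons_append]
        rw [IH s.1 ny nx _ s.2.1 s.2.2.1 s.2.2.2 hs1 hs2 hb.1 hb.2.1 hb.2.2.1 hb.2.2.2 hv hcnt]
        have hcond : ny < ((s.1.length : Nat) : Int) ∧ ny > -1 ∧ nx < ((s.1.length : Nat) : Int) ∧
            nx > -1 ∧ get2 s.1 ny nx = ch := by
          refine ⟨by omega, by omega, by omega, by omega, hv⟩
        rw [← nbGo_pos f ch ny nx s hcond]
        have hinv := nb_inv ch L f s.1 ny nx s.2.1 s.2.2.1 s.2.2.2 hs1 hs2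
        rw [← nbGo_pos f ch ny nx s hcond] at hinv
        exact ihq (nbGo f ch ny nx s) stack hinv.1 hinv.2.1 (le_trans hinv.2.2 hcnt)
      · have hvne : v ≠ ch := by rw [← hg]; exact hv
        rw [List.cons_append]
        rw [loopB_skip ch s.1 ny nx _ s.2.1 s.2.2.1 s.2.2.2 row v hb.1 hb.2.2.1 hy hx hvne]
        rw [nbGo_neg f ch ny nx s (by intro hc; exact hv hc.2.2.2.2)]
        exact ihq s stack hs1 hs2 hcnt
    · rw [List.filter_cons_of_neg (by simpa using hb)]
      rw [nbGo_neg f ch ny nx s (by rw [hs1]; intro hc; exact hb ⟨by omega, by omega, by omega, by omega⟩)]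
      exact ihq s stack hs1 hs2 hcnt

-- MAIN LEMMA: the recursive flood fill (with sufficient fuel) equals the explicit-stack flood fill
theorem nb_loop (ch : Int) (L : Nat) : ∀ (fa : Nat) (b : List (List Int)) (y x : Int)
    (stack box : List (Int × Int)) (mn mx : Int × Int),
    b.length = L → (∀ r ∈ b, L ≤ r.length) →
    0 ≤ y → y < (L : Int) → 0 ≤ x → x < (L : Int) →
    get2 b y x = ch → cnt b ch ≤ fa →
    loopB ch b ((y, x) :: stack) box mn mx =
      loopB ch (nb fa b y x ch box mn mx).1 stack (nb fa b y x ch box mn mx).2.1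
        (nb fa b y x ch box mn mx).2.2.1 (nb fa b y x ch box mn mx).2.2.2 := by
  intro fa
  induction fa with
  | zero =>
    intro b y x stack box mn mx h1 h2 h0y hyL h0x hxL hch hcnt
    obtain ⟨row, v, hy, hx, hg⟩ := cell_exists b y x L h1 h2 h0y hyL h0x hxL
    have := cnt_pos b y x row v ch hy hx (by rw [← hg]; exact hch.symm ▸ rfl)
    omega
  | succ f ih =>
    intro b y x stack box mn mx h1 h2 h0y hyL h0x hxL hch hcnt
    obtain ⟨row, v, hy, hx, hg⟩ := cell_exists b y x L h1 h2 h0y hyL h0x hxL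
    have hvch : v = ch := by rw [← hg]; exact hch
    rw [loopB_mark ch b y x stack box mn mx row v h0y h0x hy hx hvch]
    rw [nb_succ]
    simp only [add_zero]
    have hb1len : (set2 b y x (if ch = 1 then 0 else 1)).length = b.length := set2_length b y x _
    have hpred : (fun p : Int × Int => decide (0 ≤ p.1 ∧ p.1 < ((set2 b y x (if ch = 1 then 0 else 1)).length : Int) ∧
        0 ≤ p.2 ∧ p.2 < ((set2 b y x (if ch = 1 then 0 else 1)).length : Int)))
        = (fun w : Int × Int => decide (0 ≤ w.1 ∧ w.1 < (L : Int) ∧ 0 ≤ w.2 ∧ w.2 < (L : Int))) := by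
      rw [hb1len, h1]
    rw [hpred]
    rw [← List.filter_reverse]
    have hrev : ([(y - 1, x), (y + 1, x), (y, x - 1), (y, x + 1)] : List (Int × Int)).reverse
        = [(y, x + 1), (y, x - 1), (y + 1, x), (y - 1, x)] := by simp
    rw [hrev]
    have hcell : cnt (set2 b y x (if ch = 1 then 0 else 1)) ch + 1 = cnt b ch :=
      pv_cnt_set2_lt b y x row v _ ch hy hx hvch (mark_ne ch)
    have happ := pv_chain ch L f ih
      [(y, x + 1), (y, x - 1), (y + 1, x), (y - 1, x)]
      (set2 b y x (if ch = 1 then 0 else 1), box ++ [(y, x)],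
        (if y < mn.1 then y else mn.1, if x < mn.2 then x else mn.2),
        (if y > mx.1 then y else mx.1, if x > mx.2 then x else mx.2))
      stack (by rw [hb1len, h1]) (set2_rows b y x _ L (h1 ▸ h2))
      (show cnt (set2 b y x (if ch = 1 then 0 else 1)) ch ≤ f by omega)
    exact happ

-- fold two step functions that agree on (and preserve) an invariant
theorem pv_foldl_inv {α σ : Type} (Inv : σ → Prop) (f g : σ → α → σ) :
    ∀ (xs : List α), (∀ s a, Inv s → a ∈ xs → f s a = g s a) → (∀ s a, Inv s → a ∈ xs → Inv (f s a)) →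
    ∀ s, Inv s → xs.foldl f s = xs.foldl g s ∧ Inv (xs.foldl f s) := by
  intro xs
  induction xs with
  | nil => intro _ _ s hs; exact ⟨rfl, hs⟩
  | cons a l ihl =>
    intro hfg hpres s hs
    have e := hfg s a hs (by simp)
    have hI := hpres s a hs (by simp)
    rw [List.foldl_cons, List.foldl_cons, ← e]
    exact ihl (fun s b hsb hb => hfg s b hsb (List.mem_cons_of_mem a hb))
      (fun s b hsb hb => hpres s b hsb (List.mem_cons_of_mem a hb)) (f s a) hI

theorem search_eq (board : List (List Int)) (ch_num : Int)
    (hpre : ∀ r ∈ board, board.length ≤ r.length) :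
    search board ch_num = search_alt board ch_num := by
  simp only [search, search_alt]
  refine congrArg Prod.snd ?_
  refine (pv_foldl_inv (fun st : (List (List Int)) × List (List (List Int)) =>
      st.1.length = board.length ∧ ∀ r ∈ st.1, board.length ≤ r.length) _ _ _ ?_ ?_ (board, []) ⟨rfl, hpre⟩).1
  · intro st i hs hi
    obtain ⟨hi0, hiL⟩ := PySem.List.mem_pyRange_one.mp hi
    refine (pv_foldl_inv (fun st : (List (List Int)) × List (List (List Int)) =>
        st.1.length = board.length ∧ ∀ r ∈ st.1, board.length ≤ r.length) _ _ _ ?_ ?_ st hs).1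
    · intro st j hs hj
      obtain ⟨hj0, hjL⟩ := PySem.List.mem_pyRange_one.mp hj
      by_cases hc : get2 st.1 i j = ch_num
      · simp only [if_pos hc]
        have key := nb_loop ch_num board.length (cnt st.1 ch_num) st.1 i j [] [] (i, j) (i, j)
          hs.1 hs.2 hi0 (by exact_mod_cast hiL) hj0 (by exact_mod_cast hjL) hc (le_refl _)
        rw [loopB_nil] at key
        rw [key]
      · simp only [if_neg hc]
    · intro st j hs hj
      by_cases hc : get2 st.1 i j = ch_num
      · simp only [if_pos hc]
        have hinv := nb_inv ch_num board.length (cnt st.1 ch_num) st.1 i j [] (i, j) (i, j) hs.1 hs.2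
        exact ⟨hinv.1, hinv.2.1⟩
      · simp only [if_neg hc]; exact hs
  · intro st i hs hi
    refine (pv_foldl_inv (fun st : (List (List Int)) × List (List (List Int)) =>
        st.1.length = board.length ∧ ∀ r ∈ st.1, board.length ≤ r.length) _ _ _
      (fun _ _ _ _ => rfl) ?_ st hs).2
    intro st j hs hj
    by_cases hc : get2 st.1 i j = ch_num
    · simp only [if_pos hc]
      have hinv := nb_inv ch_num board.length (cnt st.1 ch_num) st.1 i j [] (i, j) (i, j) hs.1 hs.2
      exact ⟨hinv.1, hinv.2.1⟩
    · simp only [if_neg hc]; exact hs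

-- ===== VERDICT (by name: the statement is the Claim_ definition above) =====
theorem search_spec : Claim_equal_search := by
  intro board ch_num _ hpre
  exact search_eq board ch_num hpre
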